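-- pv_equiv track=rewrite | github.com/gistable/gistable | all-gists/6622819/snippet.py | _clean_output_lines
-- ===== SOURCE A (Python) =====
-- def _clean_output_lines(text):
--     first_line = True
--     trimmed_lines = []
--     for line in text.split('\n'):
--         if first_line and not line.strip():
--             continue
--
--         # Discard matplotlib objects
--         if "<matplotlib." in line:
--             continue
--         if "<Container object" in line:
--             continue
--         if "ticklabel" in line:
--             continue
--
--         trimmed_lines.append(line + '\n')
--         first_line = False
--     return trimmed_lines
-- ===== SOURCE B (Python) =====
-- def _clean_output_lines(text):
--     markers = ("<matplotlib.", "<Container object", "ticklabel")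
--     filtered = [l for l in text.split('\n') if not any(m in l for m in markers)]
--     start = 0
--     while start < len(filtered) and not filtered[start].strip():
--         start += 1
--     return [l + '\n' for l in filtered[start:]]
-- ===== Notes on version B (the rewrite author's own statement) =====
-- stated objective: alternative
-- what changed: Replaces A's single stateful pass with a first_line flag by three phases: filter out marker lines, advance an index past leading whitespace-only lines, then append newlines to the tail slice.
import Mathlib
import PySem

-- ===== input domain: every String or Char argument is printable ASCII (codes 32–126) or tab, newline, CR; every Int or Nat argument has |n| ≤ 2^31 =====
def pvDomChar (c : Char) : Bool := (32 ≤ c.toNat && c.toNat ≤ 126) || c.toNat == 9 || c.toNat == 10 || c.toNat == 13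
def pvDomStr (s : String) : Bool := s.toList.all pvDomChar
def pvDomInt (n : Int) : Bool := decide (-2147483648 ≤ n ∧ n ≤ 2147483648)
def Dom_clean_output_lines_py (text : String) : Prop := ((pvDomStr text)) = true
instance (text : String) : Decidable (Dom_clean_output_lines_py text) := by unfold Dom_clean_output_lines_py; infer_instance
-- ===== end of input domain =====

-- B replaces A's single stateful pass (first_line flag) with three phases: marker filter, leading-blank skip, newline append; same cost.

-- ===== PORT A =====
-- loop body of A's single pass: state = (first_line, trimmed_lines)
def pvStepA (st : Bool × List String) (line : String) : Bool × List String :=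
  if st.1 && (PySem.Str.strip line == "") then st
  else if PySem.Str.isIn "<matplotlib." line then st
  else if PySem.Str.isIn "<Container object" line then st
  else if PySem.Str.isIn "ticklabel" line then st
  else (false, st.2 ++ [line ++ "\n"])

def clean_output_lines_py (text : String) : List String :=
  (((PySem.Str.split? text "\n").getD []).foldl pvStepA (true, ([] : List String))).2

-- ===== PORT B =====
def clean_output_lines_py_alt (text : String) : List String :=
  let filtered := ((PySem.Str.split? text "\n").getD []).filter
    (fun l => !(PySem.Str.isIn "<matplotlib." l || PySem.Str.isIn "<Container object" l || PySem.Str.isIn "ticklabel" l))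
  let rest := filtered.dropWhile (fun l => PySem.Str.strip l == "")
  rest.map (fun l => l ++ "\n")

-- ===== PRECONDITION & SPEC =====
def Spec_clean_output_lines_py (text : String) (out : List String) : Prop := out = clean_output_lines_py_alt text
instance (text : String) (out : List String) : Decidable (Spec_clean_output_lines_py text out) := by unfold Spec_clean_output_lines_py; infer_instance

-- ===== CLAIM (what is proved, stated in full; the proofs are below) =====
def Claim_equal_clean_output_lines_py : Prop := ∀ (text : String), Dom_clean_output_lines_py text → Spec_clean_output_lines_py text (clean_output_lines_py text)

-- ===== LEMMAS AND PROOFS =====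
def pvMarker (l : String) : Bool :=
  PySem.Str.isIn "<matplotlib." l || PySem.Str.isIn "<Container object" l || PySem.Str.isIn "ticklabel" l

def pvBlank (l : String) : Bool := PySem.Str.strip l == ""

theorem pvStepA_marker {l : String} (h : pvMarker l = true) (st : Bool × List String) :
    pvStepA st l = st := by
  unfold pvMarker at h
  unfold pvStepA
  split_ifs with c1 c2 c3 c4
  · rfl
  · rfl
  · rfl
  · rfl
  · exact absurd h (by simp only [Bool.or_eq_true]; tauto)

theorem pvStepA_keep_false {l : String} (h : pvMarker l = false) (acc : List String) :
    pvStepA (false, acc) l = (false, acc ++ [l ++ "\n"]) := by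
  unfold pvMarker at h
  simp only [Bool.or_eq_false_iff] at h
  unfold pvStepA
  split_ifs with c1 c2 c3 c4
  · simp at c1
  · exact absurd c2 (by simp_all)
  · exact absurd c3 (by simp_all)
  · exact absurd c4 (by simp_all)
  · rfl

theorem pvStepA_true_blank {l : String} (h : pvBlank l = true) (acc : List String) :
    pvStepA (true, acc) l = (true, acc) := by
  unfold pvBlank at h
  unfold pvStepA
  rw [if_pos (by simp [h])]

theorem pvStepA_true_keep {l : String} (hb : pvBlank l = false) (hm : pvMarker l = false)
    (acc : List String) : pvStepA (true, acc) l = (false, acc ++ [l ++ "\n"]) := by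
  unfold pvBlank at hb
  unfold pvMarker at hm
  simp only [Bool.or_eq_false_iff] at hm
  unfold pvStepA
  split_ifs with c1 c2 c3 c4
  · exact absurd c1 (by simp_all)
  · exact absurd c2 (by simp_all)
  · exact absurd c3 (by simp_all)
  · exact absurd c4 (by simp_all)
  · rfl

-- after the first append, A keeps every non-marker line
theorem pvFoldA_false (ls : List String) (acc : List String) :
    ls.foldl pvStepA (false, acc)
      = (false, acc ++ (ls.filter (fun l => !pvMarker l)).map (fun l => l ++ "\n")) := by
  induction ls generalizing acc with
  | nil => simp
  | cons l ls ih =>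
    cases hm : pvMarker l with
    | true =>
      rw [List.foldl_cons, pvStepA_marker hm, ih]
      simp [hm]
    | false =>
      rw [List.foldl_cons, pvStepA_keep_false hm, ih]
      simp [hm]

-- while first_line is set, A drops blank and marker lines; B's three phases compute the same list
theorem pvFoldA_true (ls : List String) (acc : List String) :
    (ls.foldl pvStepA (true, acc)).2
      = acc ++ (((ls.filter (fun l => !pvMarker l)).dropWhile pvBlank).map (fun l => l ++ "\n")) := by
  induction ls generalizing acc with
  | nil => simp
  | cons l ls ih =>
    cases hm : pvMarker l with
    | true =>
      rw [List.foldl_cons, pvStepA_marker hm, ih]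
      simp [hm]
    | false =>
      cases hb : pvBlank l with
      | true =>
        rw [List.foldl_cons, pvStepA_true_blank hb, ih]
        simp [hm, hb]
      | false =>
        rw [List.foldl_cons, pvStepA_true_keep hb hm, pvFoldA_false]
        simp [hm, hb]

-- ===== VERDICT (by name: the statement is the Claim_ definition above) =====
theorem clean_output_lines_py_spec : Claim_equal_clean_output_lines_py := by
  intro text _
  unfold Spec_clean_output_lines_py clean_output_lines_py clean_output_lines_py_alt
  rw [pvFoldA_true]
  rfl
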